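-- pv_equiv track=rewrite | github.com/ezeeEric/autoembedder | utils/feature_handler.py | available_features_in_reference
-- ===== SOURCE A (Python) =====
-- def available_features_in_reference(
--     selected_features: list[str], reference_feature_list: list[str] = []
-- ) -> list[str]:
--     """From a given list of selected feature names, return only those which are
--     present in a reference list. If no reference list is given, return selected
--     feature list."""
--     if len(reference_feature_list) < 1:
--         return sorted(selected_features)
--
--     available_selected_features = set()
--     for ref_feat in reference_feature_list:
--         for feat in selected_features:
--             if ref_feat.startswith(feat):
--                 available_selected_features.add(feat)
--     return sorted(list(available_selected_features))
-- ===== SOURCE B (Python) =====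
-- def available_features_in_reference(
--     selected_features: list[str], reference_feature_list: list[str] = []
-- ) -> list[str]:
--     """From a given list of selected feature names, return only those which are
--     present in a reference list. If no reference list is given, return selected
--     feature list."""
--     if len(reference_feature_list) < 1:
--         return sorted(selected_features)
--
--     selected = set(selected_features)
--     matched = set()
--     for ref_feat in reference_feature_list:
--         for k in range(len(ref_feat) + 1):
--             prefix = ref_feat[:k]
--             if prefix in selected:
--                 matched.add(prefix)
--     return sorted(matched)
-- ===== Notes on version B (the rewrite author's own statement) =====
-- stated objective: faster
-- what changed: Instead of testing every (reference, feature) pair with startswith, B hashes the selected features into a set once and, for each reference string, enumerates its own prefixes and looks each up in that set, so the inner scan over selected_features disappears.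
import Mathlib
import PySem

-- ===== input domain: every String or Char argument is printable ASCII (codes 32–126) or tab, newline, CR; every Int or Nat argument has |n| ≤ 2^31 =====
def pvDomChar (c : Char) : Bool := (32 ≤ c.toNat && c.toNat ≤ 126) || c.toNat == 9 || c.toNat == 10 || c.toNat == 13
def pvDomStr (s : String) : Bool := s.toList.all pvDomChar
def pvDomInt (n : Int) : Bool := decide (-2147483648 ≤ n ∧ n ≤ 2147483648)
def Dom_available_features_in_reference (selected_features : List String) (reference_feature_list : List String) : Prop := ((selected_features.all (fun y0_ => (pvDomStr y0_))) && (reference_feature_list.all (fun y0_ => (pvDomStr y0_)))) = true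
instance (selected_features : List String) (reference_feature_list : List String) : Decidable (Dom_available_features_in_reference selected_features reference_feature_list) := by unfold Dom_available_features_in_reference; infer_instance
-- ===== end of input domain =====

-- B replaces A's pairwise reference x feature startswith scan by hashing the selected features
-- into a set once and, for each reference, enumerating ITS OWN prefixes and looking each up
-- in that set: the inner scan over selected_features disappears.

-- ===== PORT A =====
def available_features_in_reference (selected_features : List String) (reference_feature_list : List String) : List String :=
  if reference_feature_list.length < 1 then
    PySem.List.sorted selected_features (fun x => x) false
  else
    let available_selected_features : PySem.Set String :=
      reference_feature_list.foldl (fun acc ref_feat =>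
        selected_features.foldl (fun acc2 feat =>
          if PySem.Str.startswith ref_feat feat then PySem.Set.add acc2 feat else acc2) acc)
        PySem.Set.empty
    PySem.List.sorted available_selected_features (fun x => x) false

-- ===== PORT B =====
def available_features_in_reference_alt (selected_features : List String) (reference_feature_list : List String) : List String :=
  if reference_feature_list.length < 1 then
    PySem.List.sorted selected_features (fun x => x) false
  else
    let selected : PySem.Set String := PySem.Set.ofList selected_features
    let matched : PySem.Set String :=
      reference_feature_list.foldl (fun m ref_feat =>
        (PySem.List.pyRange 0 (PySem.Str.len ref_feat + 1) 1).foldl (fun m2 k =>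
          let pre := PySem.Str.slice ref_feat none (some k)
          if PySem.Set.contains selected pre then PySem.Set.add m2 pre else m2) m)
        PySem.Set.empty
    PySem.List.sorted matched (fun x => x) false

-- ===== PRECONDITION & SPEC =====
def Spec_available_features_in_reference (selected_features : List String) (reference_feature_list : List String) (out : List String) : Prop := out = available_features_in_reference_alt selected_features reference_feature_list
instance (selected_features : List String) (reference_feature_list : List String) (out : List String) : Decidable (Spec_available_features_in_reference selected_features reference_feature_list out) := by unfold Spec_available_features_in_reference; infer_instance

-- ===== CLAIM =====
def Claim_equal_available_features_in_reference : Prop := ∀ (selected_features : List String) (reference_feature_list : List String), Dom_available_features_in_reference selected_features reference_feature_list → Spec_available_features_in_reference selected_features reference_feature_list (available_features_in_reference selected_features reference_feature_list)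

-- ===== LEMMAS AND PROOFS =====

-- A side: membership and nodup of the nested startswith fold
theorem pvA_inner_mem (sel : List String) (ref : String) (acc : List String) (x : String) :
    x ∈ sel.foldl (fun acc2 feat =>
      if PySem.Str.startswith ref feat then PySem.Set.add acc2 feat else acc2) acc ↔
    x ∈ acc ∨ (x ∈ sel ∧ PySem.Str.startswith ref x = true) := by
  induction sel generalizing acc with
  | nil => simp
  | cons f t ih =>
    simp only [List.foldl_cons]
    by_cases h : PySem.Str.startswith ref f = true
    · rw [if_pos h, ih]
      simp only [PySem.Set.mem_add, List.mem_cons]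
      constructor
      · rintro (⟨h1 | rfl⟩ | ⟨h1, h2⟩)
        · exact Or.inl h1
        · exact Or.inr ⟨Or.inl rfl, h⟩
        · exact Or.inr ⟨Or.inr h1, h2⟩
      · rintro (h1 | ⟨rfl | h1, h2⟩)
        · exact Or.inl (Or.inl h1)
        · exact Or.inl (Or.inr rfl)
        · exact Or.inr ⟨h1, h2⟩
    · rw [if_neg h, ih]
      simp only [List.mem_cons]
      constructor
      · rintro (h1 | ⟨h1, h2⟩)
        · exact Or.inl h1
        · exact Or.inr ⟨Or.inr h1, h2⟩
      · rintro (h1 | ⟨rfl | h1, h2⟩)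
        · exact Or.inl h1
        · exact absurd h2 h
        · exact Or.inr ⟨h1, h2⟩

theorem pvA_inner_nodup (sel : List String) (ref : String) (acc : List String)
    (h : acc.Nodup) :
    (sel.foldl (fun acc2 feat =>
      if PySem.Str.startswith ref feat then PySem.Set.add acc2 feat else acc2) acc).Nodup := by
  induction sel generalizing acc with
  | nil => exact h
  | cons f t ih =>
    simp only [List.foldl_cons]
    apply ih
    split
    · exact PySem.Set.nodup_add _ _ h
    · exact h

theorem pvA_outer_mem (sel refs : List String) (acc : List String) (x : String) :
    x ∈ refs.foldl (fun acc ref =>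
      sel.foldl (fun acc2 feat =>
        if PySem.Str.startswith ref feat then PySem.Set.add acc2 feat else acc2) acc) acc ↔
    x ∈ acc ∨ (x ∈ sel ∧ ∃ r ∈ refs, PySem.Str.startswith r x = true) := by
  induction refs generalizing acc with
  | nil => simp
  | cons r t ih =>
    simp only [List.foldl_cons, ih, pvA_inner_mem]
    constructor
    · rintro ((h1 | ⟨h1, h2⟩) | ⟨h1, r', hr', h2⟩)
      · exact Or.inl h1
      · exact Or.inr ⟨h1, r, by simp, h2⟩
      · exact Or.inr ⟨h1, r', by simp [hr'], h2⟩
    · rintro (h1 | ⟨h1, r', hr', h2⟩)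
      · exact Or.inl (Or.inl h1)
      · rcases List.mem_cons.mp hr' with rfl | hr'
        · exact Or.inl (Or.inr ⟨h1, h2⟩)
        · exact Or.inr ⟨h1, r', hr', h2⟩

theorem pvA_outer_nodup (sel refs : List String) (acc : List String) (h : acc.Nodup) :
    (refs.foldl (fun acc ref =>
      sel.foldl (fun acc2 feat =>
        if PySem.Str.startswith ref feat then PySem.Set.add acc2 feat else acc2) acc) acc).Nodup := by
  induction refs generalizing acc with
  | nil => exact h
  | cons r t ih => exact ih _ (pvA_inner_nodup sel r acc h)

-- B side: membership and nodup of the prefix-enumeration fold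
theorem pvB_inner_mem (selected : PySem.Set String) (ref : String) (ks : List Int)
    (m : List String) (x : String) :
    x ∈ ks.foldl (fun m2 k =>
      let pre := PySem.Str.slice ref none (some k)
      if PySem.Set.contains selected pre then PySem.Set.add m2 pre else m2) m ↔
    x ∈ m ∨ (PySem.Set.contains selected x = true ∧
      ∃ k ∈ ks, PySem.Str.slice ref none (some k) = x) := by
  induction ks generalizing m with
  | nil => simp
  | cons k t ih =>
    simp only [List.foldl_cons]
    by_cases h : PySem.Set.contains selected (PySem.Str.slice ref none (some k)) = true
    · rw [if_pos h, ih]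
      simp only [PySem.Set.mem_add, List.mem_cons]
      constructor
      · rintro (⟨h1 | rfl⟩ | ⟨h1, k', hk', h2⟩)
        · exact Or.inl h1
        · exact Or.inr ⟨h, k, Or.inl rfl, rfl⟩
        · exact Or.inr ⟨h1, k', Or.inr hk', h2⟩
      · rintro (h1 | ⟨h1, k', rfl | hk', h2⟩)
        · exact Or.inl (Or.inl h1)
        · exact Or.inl (Or.inr h2.symm)
        · exact Or.inr ⟨h1, k', hk', h2⟩
    · rw [if_neg h, ih]
      simp only [List.mem_cons]
      constructor
      · rintro (h1 | ⟨h1, k', hk', h2⟩)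
        · exact Or.inl h1
        · exact Or.inr ⟨h1, k', Or.inr hk', h2⟩
      · rintro (h1 | ⟨h1, k', rfl | hk', h2⟩)
        · exact Or.inl h1
        · exact absurd (h2 ▸ h1) h
        · exact Or.inr ⟨h1, k', hk', h2⟩

theorem pvB_inner_nodup (selected : PySem.Set String) (ref : String) (ks : List Int)
    (m : List String) (h : m.Nodup) :
    (ks.foldl (fun m2 k =>
      let pre := PySem.Str.slice ref none (some k)
      if PySem.Set.contains selected pre then PySem.Set.add m2 pre else m2) m).Nodup := by
  induction ks generalizing m with
  | nil => exact h
  | cons k t ih =>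
    simp only [List.foldl_cons]
    apply ih
    split
    · exact PySem.Set.nodup_add _ _ h
    · exact h

-- a prefix of ref is exactly a slice ref[:k] for some k in range(len(ref)+1)
theorem pvB_prefix_iff (ref x : String) :
    (∃ k ∈ PySem.List.pyRange 0 (PySem.Str.len ref + 1) 1,
        PySem.Str.slice ref none (some k) = x) ↔ x.toList <+: ref.toList := by
  constructor
  · rintro ⟨k, hk, rfl⟩
    rcases (PySem.List.mem_pyRange_one).mp hk with ⟨hk0, _⟩
    have hsl : (PySem.Str.slice ref none (some k)).toList = ref.toList.take k.toNat := by
      simp [PySem.Str.slice, PySem.List.slice_to _ hk0]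
    rw [hsl]
    exact List.take_prefix _ _
  · intro hpre
    refine ⟨(x.toList.length : Int), ?_, ?_⟩
    · rw [PySem.List.mem_pyRange_one]
      have hle := hpre.length_le
      rw [PySem.Str.len_eq]
      constructor
      · positivity
      · omega
    · apply String.toList_inj.mp
      have hsl : (PySem.Str.slice ref none (some (x.toList.length : Int))).toList
          = ref.toList.take x.toList.length := by
        simp [PySem.Str.slice, PySem.List.slice_to_natCast]
      rw [hsl]
      exact (List.prefix_iff_eq_take.mp hpre).symm

theorem pvB_outer_mem (selected : PySem.Set String) (refs : List String)
    (m : List String) (x : String) :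
    x ∈ refs.foldl (fun m ref_feat =>
      (PySem.List.pyRange 0 (PySem.Str.len ref_feat + 1) 1).foldl (fun m2 k =>
        let pre := PySem.Str.slice ref_feat none (some k)
        if PySem.Set.contains selected pre then PySem.Set.add m2 pre else m2) m) m ↔
    x ∈ m ∨ (PySem.Set.contains selected x = true ∧
      ∃ r ∈ refs, x.toList <+: r.toList) := by
  induction refs generalizing m with
  | nil => simp
  | cons r t ih =>
    simp only [List.foldl_cons, ih, pvB_inner_mem, pvB_prefix_iff]
    constructor
    · rintro ((h1 | ⟨h1, h2⟩) | ⟨h1, r', hr', h2⟩)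
      · exact Or.inl h1
      · exact Or.inr ⟨h1, r, by simp, h2⟩
      · exact Or.inr ⟨h1, r', by simp [hr'], h2⟩
    · rintro (h1 | ⟨h1, r', hr', h2⟩)
      · exact Or.inl (Or.inl h1)
      · rcases List.mem_cons.mp hr' with rfl | hr'
        · exact Or.inl (Or.inr ⟨h1, h2⟩)
        · exact Or.inr ⟨h1, r', hr', h2⟩

theorem pvB_outer_nodup (selected : PySem.Set String) (refs : List String)
    (m : List String) (h : m.Nodup) :
    (refs.foldl (fun m ref_feat =>
      (PySem.List.pyRange 0 (PySem.Str.len ref_feat + 1) 1).foldl (fun m2 k =>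
        let pre := PySem.Str.slice ref_feat none (some k)
        if PySem.Set.contains selected pre then PySem.Set.add m2 pre else m2) m) m).Nodup := by
  induction refs generalizing m with
  | nil => exact h
  | cons r t ih => exact ih _ (pvB_inner_nodup selected r _ m h)

-- ===== VERDICT =====
theorem available_features_in_reference_spec : Claim_equal_available_features_in_reference := by
  intro sel refs _
  unfold Spec_available_features_in_reference available_features_in_reference available_features_in_reference_alt
  cases refs with
  | nil => simp
  | cons r t =>
    rw [if_neg (by simp), if_neg (by simp)]
    apply PySem.List.sorted_eq_sorted_of_perm
    · exact fun a b h => h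
    · rw [List.perm_ext_iff_of_nodup
        (pvA_outer_nodup sel (r :: t) PySem.Set.empty List.nodup_nil)
        (pvB_outer_nodup (PySem.Set.ofList sel) (r :: t) PySem.Set.empty List.nodup_nil)]
      intro x
      rw [pvA_outer_mem, pvB_outer_mem]
      simp only [PySem.Set.contains_iff, PySem.Set.mem_ofList]
      constructor
      · rintro (h | ⟨h1, r', hr', h2⟩)
        · exact absurd h (by simp)
        · exact Or.inr ⟨h1, r', hr', (PySem.Chars.startswith_iff _ _).mp (by simpa [PySem.Str.startswith] using h2)⟩
      · rintro (h | ⟨h1, r', hr', h2⟩)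
        · exact absurd h (by simp)
        · exact Or.inr ⟨h1, r', hr', by simpa [PySem.Str.startswith] using (PySem.Chars.startswith_iff r'.toList x.toList).mpr h2⟩
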